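-- pv_equiv track=rewrite | github.com/fayahmad07/deployanalisiskepuasanpelangganmiegacoan | sentiment_analysis_streamlit_app_cluster.py | ekstrak_sentimen
-- ===== SOURCE A (Python) =====
-- kata_positif = ['baik','ramah','enak','mantap','nyaman','bagus','suka','rekomendasi','puas','lezat','murah','senang','biasa',
--                 'sempurna','bersih','indah','cantik','keren','cepat','strategis','sesuai','ramai','keren','juara','kekinian',
--                 'konsisten','efisien','luas','asik','sopan','hangat','dingim','cukup','lumayan','jelas','teliti','gurih','segar','nikmat',
--                 'lengkap', 'percaya','hemat','pesona','senyum','padan','sahabat','primadona','nikmat']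
--
-- kata_negatif = ['kurang','kecewa','buruk','mahal','lama','amis','pelan','jelek','buruk','jijih','lamban','lelet','cukup',
--                 'kotor','antre','payah','parkir','malas','hambar','aneh','lembek','kesal','jorok','lengket','zonk','lelucon',
--                 'fiktif','ghaib','tipu','benci','sulit','parah','berisik','kacau','mual','salah']
--
-- negasi = ["tidak", "bukan", "belum"]
--
-- def ekstrak_sentimen(teks):
--     kata_kata = teks.lower().split()
--     hasil = []
--     hasil_ = []
--
--     i = 0
--     while i < len(kata_kata):
--         word = kata_kata[i]
--
--         # Check for negations
--         if word in negasi and i + 1 < len(kata_kata):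
--             next_word = kata_kata[i + 1]
--             if next_word in kata_positif + kata_negatif:
--                 hasil.append(f"{word} {next_word}")
--                 i += 2
--                 hasil_.append(0 if next_word in kata_positif else 1)
--                 continue
--
--         # Positive/negative word without negation
--         if word in kata_positif + kata_negatif:
--             hasil.append(word)
--             hasil_.append(1 if word in kata_positif else 0)
--
--         i += 1
--
--     return hasil, hasil_
-- ===== SOURCE B (Python) =====
-- kata_positif = ['baik','ramah','enak','mantap','nyaman','bagus','suka','rekomendasi','puas','lezat','murah','senang','biasa',
--                 'sempurna','bersih','indah','cantik','keren','cepat','strategis','sesuai','ramai','keren','juara','kekinian',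
--                 'konsisten','efisien','luas','asik','sopan','hangat','dingim','cukup','lumayan','jelas','teliti','gurih','segar','nikmat',
--                 'lengkap', 'percaya','hemat','pesona','senyum','padan','sahabat','primadona','nikmat']
--
-- kata_negatif = ['kurang','kecewa','buruk','mahal','lama','amis','pelan','jelek','buruk','jijih','lamban','lelet','cukup',
--                 'kotor','antre','payah','parkir','malas','hambar','aneh','lembek','kesal','jorok','lengket','zonk','lelucon',
--                 'fiktif','ghaib','tipu','benci','sulit','parah','berisik','kacau','mual','salah']
--
-- negasi = ["tidak", "bukan", "belum"]
--
-- _POS = set(kata_positif)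
-- _NEG = set(kata_negatif)
-- _SENT = _POS | _NEG
--
-- def ekstrak_sentimen(teks):
--     hasil = []
--     hasil_ = []
--     pending = None  # a negation word waiting for a sentiment word
--     for word in teks.lower().split():
--         if pending is not None:
--             if word in _SENT:
--                 hasil.append(f"{pending} {word}")
--                 hasil_.append(0 if word in _POS else 1)
--                 pending = None
--                 continue
--             pending = None
--         if word in negasi:
--             pending = word
--         elif word in _SENT:
--             hasil.append(word)
--             hasil_.append(1 if word in _POS else 0)
--     return hasil, hasil_
-- ===== Notes on version B (the rewrite author's own statement) =====
-- stated objective: alternative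
-- what changed: Replaced A's index-based while loop with kata_kata[i+1] look-ahead and i+=2 skipping by a single forward for-loop maintaining a pending-negation state variable, with precomputed sets for the membership tests.
import Mathlib
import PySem

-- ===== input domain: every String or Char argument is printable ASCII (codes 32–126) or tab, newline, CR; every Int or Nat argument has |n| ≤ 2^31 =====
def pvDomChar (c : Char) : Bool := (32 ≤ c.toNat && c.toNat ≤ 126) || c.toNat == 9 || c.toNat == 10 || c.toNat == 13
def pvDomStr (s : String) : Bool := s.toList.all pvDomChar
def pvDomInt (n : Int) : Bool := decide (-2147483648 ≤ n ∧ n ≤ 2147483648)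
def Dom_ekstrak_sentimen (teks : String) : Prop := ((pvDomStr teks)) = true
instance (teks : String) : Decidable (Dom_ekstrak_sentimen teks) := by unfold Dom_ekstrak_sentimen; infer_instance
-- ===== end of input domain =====

-- B replaces A's index-based look-ahead loop with a single forward pass keeping a
-- 'pending negation' state (objective: alternative decomposition; same return value).

-- module-level constants shared by both Pythons
def kata_positif : List String := ["baik","ramah","enak","mantap","nyaman","bagus","suka","rekomendasi","puas","lezat","murah","senang","biasa",
  "sempurna","bersih","indah","cantik","keren","cepat","strategis","sesuai","ramai","keren","juara","kekinian",
  "konsisten","efisien","luas","asik","sopan","hangat","dingim","cukup","lumayan","jelas","teliti","gurih","segar","nikmat",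
  "lengkap","percaya","hemat","pesona","senyum","padan","sahabat","primadona","nikmat"]

def kata_negatif : List String := ["kurang","kecewa","buruk","mahal","lama","amis","pelan","jelek","buruk","jijih","lamban","lelet","cukup",
  "kotor","antre","payah","parkir","malas","hambar","aneh","lembek","kesal","jorok","lengket","zonk","lelucon",
  "fiktif","ghaib","tipu","benci","sulit","parah","berisik","kacau","mual","salah"]

def negasi : List String := ["tidak", "bukan", "belum"]

-- ===== PORT A =====
-- A's while-loop over kata_kata with index i and look-ahead kata_kata[i+1],
-- transcribed as recursion on the suffix starting at i (i+=2 drops two words).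
def ekstrakLoopA : List String → List String × List Int
  | [] => ([], [])
  | [word] =>
    if word ∈ kata_positif ++ kata_negatif then
      ([word], [if word ∈ kata_positif then (1 : Int) else 0])
    else ([], [])
  | word :: next_word :: rest =>
    if word ∈ negasi ∧ next_word ∈ kata_positif ++ kata_negatif then
      let r := ekstrakLoopA rest
      ((word ++ " " ++ next_word) :: r.1,
       (if next_word ∈ kata_positif then (0 : Int) else 1) :: r.2)
    else
      let r := ekstrakLoopA (next_word :: rest)
      if word ∈ kata_positif ++ kata_negatif then
        (word :: r.1, (if word ∈ kata_positif then (1 : Int) else 0) :: r.2)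
      else r

def ekstrak_sentimen (teks : String) : List String × List Int :=
  ekstrakLoopA (PySem.Str.split₀ (PySem.Str.lower teks))

-- ===== PORT B =====
def posSet : PySem.Set String := PySem.Set.ofList kata_positif
def negSet : PySem.Set String := PySem.Set.ofList kata_negatif
def sentSet : PySem.Set String := PySem.Set.union posSet negSet

-- Source B's for-loop with the Optional pending-negation state.
def ekstrakLoopB : Option String → List String → List String × List Int
  | _, [] => ([], [])
  | some neg, word :: rest =>
    if word ∈ sentSet then
      let r := ekstrakLoopB none rest
      ((neg ++ " " ++ word) :: r.1, (if word ∈ posSet then (0 : Int) else 1) :: r.2)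
    else -- pending cleared; fall through to normal handling of word
      if word ∈ negasi then ekstrakLoopB (some word) rest
      else ekstrakLoopB none rest  -- word ∉ sentSet here, so no emission
  | none, word :: rest =>
    if word ∈ negasi then ekstrakLoopB (some word) rest
    else if word ∈ sentSet then
      let r := ekstrakLoopB none rest
      (word :: r.1, (if word ∈ posSet then (1 : Int) else 0) :: r.2)
    else ekstrakLoopB none rest

def ekstrak_sentimen_alt (teks : String) : List String × List Int :=
  ekstrakLoopB none (PySem.Str.split₀ (PySem.Str.lower teks))

-- ===== PRECONDITION & SPEC =====
def Spec_ekstrak_sentimen (teks : String) (out : List String × List Int) : Prop := out = ekstrak_sentimen_alt teks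
instance (teks : String) (out : List String × List Int) : Decidable (Spec_ekstrak_sentimen teks out) := by unfold Spec_ekstrak_sentimen; infer_instance

-- ===== CLAIM (what is proved, stated in full; the proofs are below) =====
def Claim_equal_ekstrak_sentimen : Prop := ∀ (teks : String), Dom_ekstrak_sentimen teks → Spec_ekstrak_sentimen teks (ekstrak_sentimen teks)

-- ===== LEMMAS AND PROOFS =====

theorem mem_sentSet (w : String) : w ∈ sentSet ↔ w ∈ kata_positif ++ kata_negatif := by
  simp [sentSet, posSet, negSet, PySem.Set.mem_union, PySem.Set.mem_ofList, List.mem_append]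

theorem mem_posSet (w : String) : w ∈ posSet ↔ w ∈ kata_positif := by
  simp [posSet, PySem.Set.mem_ofList]

theorem negasi_not_sent (w : String) (h : w ∈ negasi) : w ∉ kata_positif ++ kata_negatif := by
  simp only [negasi, List.mem_cons, List.not_mem_nil, or_false] at h
  rcases h with h | h | h <;> subst h <;> decide

theorem loopA_eq_loopB : ∀ l : List String, ekstrakLoopA l = ekstrakLoopB none l
  | [] => rfl
  | [w] => by
    by_cases hn : w ∈ negasi
    · have hns := negasi_not_sent w hn
      simp [ekstrakLoopA, ekstrakLoopB, hn, hns]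
    · by_cases hs : w ∈ kata_positif ++ kata_negatif
      · simp [ekstrakLoopA, ekstrakLoopB, hn, hs, mem_sentSet, mem_posSet]
      · simp [ekstrakLoopA, ekstrakLoopB, hn, hs, mem_sentSet]
  | w :: nw :: rest => by
    have ih1 := loopA_eq_loopB rest
    have ih2 := loopA_eq_loopB (nw :: rest)
    by_cases hn : w ∈ negasi
    · have hns := negasi_not_sent w hn
      by_cases hs : nw ∈ kata_positif ++ kata_negatif
      · simp [ekstrakLoopA, ekstrakLoopB, hn, hs, mem_sentSet, mem_posSet, ih1]
      · -- negation not followed by a sentiment word: both fall through to nw :: rest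
        have : ekstrakLoopB (some w) (nw :: rest) = ekstrakLoopB none (nw :: rest) := by
          by_cases hn2 : nw ∈ negasi <;>
            simp [ekstrakLoopB, hs, hn2, mem_sentSet]
        simp [ekstrakLoopA, ekstrakLoopB, hn, hs, hns, mem_sentSet, ih2]
    · by_cases hs : w ∈ kata_positif ++ kata_negatif
      · simp [ekstrakLoopA, ekstrakLoopB, hn, hs, mem_sentSet, mem_posSet, ih2]
      · simp [ekstrakLoopA, ekstrakLoopB, hn, hs, mem_sentSet, ih2]
termination_by l => l.length

-- ===== VERDICT (by name: the statement is the Claim_ definition above) =====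
theorem ekstrak_sentimen_spec : Claim_equal_ekstrak_sentimen := by
  intro teks _
  unfold Spec_ekstrak_sentimen ekstrak_sentimen ekstrak_sentimen_alt
  exact loopA_eq_loopB _
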